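-- pv_equiv track=rewrite | github.com/OumaCavin/jac-interactive-learning-platform | backend/apps/jac_execution/jac_executor.py | _generate_learning_tips
-- ===== SOURCE A (Python) =====
-- from typing import Dict, List, Any, Optional, Tuple
--
-- def _generate_learning_tips(code: str) -> List[str]:
--     """Generate learning tips based on the code"""
--     tips = []
--
--     if 'node' in code:
--         tips.append("Nodes are like objects in JAC - they hold data and can be connected")
--
--     if any(op in code for op in ['++>', '<++', '<++>']):
--         tips.append("Spatial operators make graph connections natural and type-safe")
--
--     if 'walker' in code:
--         tips.append("Walkers are autonomous agents that traverse graphs carrying state")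
--
--     if 'ability' in code or 'can ' in code:
--         tips.append("Abilities are triggered automatically during walker-node interactions")
--
--     if 'with entry' in code:
--         tips.append("The 'with entry' block is where your JAC program starts executing")
--
--     return tips
-- ===== SOURCE B (Python) =====
-- from typing import List, Set
--
-- _TIPS = [
--     "Nodes are like objects in JAC - they hold data and can be connected",
--     "Spatial operators make graph connections natural and type-safe",
--     "Walkers are autonomous agents that traverse graphs carrying state",
--     "Abilities are triggered automatically during walker-node interactions",
--     "The 'with entry' block is where your JAC program starts executing",
-- ]
--
-- _KEYWORDS = [
--     ('node', 0), ('++>', 1), ('<++', 1), ('<++>', 1),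
--     ('walker', 2), ('ability', 3), ('can ', 3), ('with entry', 4),
-- ]
--
-- def _scan(code: str) -> Set[int]:
--     """One left-to-right pass: at each position record every keyword starting there."""
--     found = set()
--     for i in range(len(code)):
--         for kw, idx in _KEYWORDS:
--             if code.startswith(kw, i):
--                 found.add(idx)
--     return found
--
-- def _generate_learning_tips(code: str) -> List[str]:
--     found = _scan(code)
--     return [tip for idx, tip in enumerate(_TIPS) if idx in found]
-- ===== Notes on version B (the rewrite author's own statement) =====
-- stated objective: alternative
-- what changed: Instead of A's five independent substring searches, B makes a single left-to-right scan over the code positions, recording which keywords start at each position into a found-set, and then emits the tips whose index was found.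
import Mathlib
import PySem

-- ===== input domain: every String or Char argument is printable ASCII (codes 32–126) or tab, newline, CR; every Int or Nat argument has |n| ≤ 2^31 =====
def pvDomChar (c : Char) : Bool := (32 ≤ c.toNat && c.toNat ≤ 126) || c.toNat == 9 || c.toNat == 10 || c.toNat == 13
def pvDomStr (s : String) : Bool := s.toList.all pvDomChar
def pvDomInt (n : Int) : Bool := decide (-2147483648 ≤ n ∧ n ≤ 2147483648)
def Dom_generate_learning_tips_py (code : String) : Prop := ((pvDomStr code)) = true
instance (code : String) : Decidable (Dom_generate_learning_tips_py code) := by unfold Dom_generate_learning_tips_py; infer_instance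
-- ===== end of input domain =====

-- B replaces A's five independent substring searches by a single left-to-right scan of the code
-- that records, at each position, which keywords start there, then emits the tips whose index
-- was found (objective: alternative — one pass over the input instead of eight substring searches).

-- ===== PORT A =====
def generate_learning_tips_py (code : String) : List String :=
  let tips : List String := []
  let tips := if PySem.Str.isIn "node" code then
      tips ++ ["Nodes are like objects in JAC - they hold data and can be connected"] else tips
  let tips := if (["++>", "<++", "<++>"].any fun op => PySem.Str.isIn op code) then
      tips ++ ["Spatial operators make graph connections natural and type-safe"] else tips
  let tips := if PySem.Str.isIn "walker" code then
      tips ++ ["Walkers are autonomous agents that traverse graphs carrying state"] else tips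
  let tips := if PySem.Str.isIn "ability" code || PySem.Str.isIn "can " code then
      tips ++ ["Abilities are triggered automatically during walker-node interactions"] else tips
  let tips := if PySem.Str.isIn "with entry" code then
      tips ++ ["The 'with entry' block is where your JAC program starts executing"] else tips
  tips

-- ===== PORT B =====
def pvTips : List String :=
  [ "Nodes are like objects in JAC - they hold data and can be connected",
    "Spatial operators make graph connections natural and type-safe",
    "Walkers are autonomous agents that traverse graphs carrying state",
    "Abilities are triggered automatically during walker-node interactions",
    "The 'with entry' block is where your JAC program starts executing" ]

def pvKeywords : List (List Char × Int) :=
  [ ("node".toList, 0), ("++>".toList, 1), ("<++".toList, 1), ("<++>".toList, 1),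
    ("walker".toList, 2), ("ability".toList, 3), ("can ".toList, 3), ("with entry".toList, 4) ]

-- Source B's _scan: one pass over the positions of the code; code.startswith(kw, i) is
-- Chars.startswith on the i-th suffix (exact for 0 ≤ i ≤ len).
def pvScan (cs : List Char) : PySem.Set Int :=
  (PySem.List.pyRange 0 (cs.length : Int) 1).foldl
    (fun found i =>
      pvKeywords.foldl
        (fun f kt => if PySem.Chars.startswith (cs.drop i.toNat) kt.1 then PySem.Set.add f kt.2 else f)
        found)
    PySem.Set.empty

def generate_learning_tips_py_alt (code : String) : List String :=
  let found := pvScan code.toList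
  ((PySem.List.enumerate pvTips 0).filter (fun p => decide (p.1 ∈ found))).map Prod.snd

-- ===== PRECONDITION & SPEC =====
def Spec_generate_learning_tips_py (code : String) (out : List String) : Prop := out = generate_learning_tips_py_alt code
instance (code : String) (out : List String) : Decidable (Spec_generate_learning_tips_py code out) := by unfold Spec_generate_learning_tips_py; infer_instance

-- ===== CLAIM (what is proved, stated in full; the proofs are below) =====
def Claim_equal_generate_learning_tips_py : Prop := ∀ (code : String), Dom_generate_learning_tips_py code → Spec_generate_learning_tips_py code (generate_learning_tips_py code)

-- ===== LEMMAS AND PROOFS =====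

lemma mem_foldl_inner {β : Type} (m : List β) (p : β → Bool) (g : β → Int)
    (s : PySem.Set Int) (n : Int) :
    n ∈ m.foldl (fun f' k => if p k then PySem.Set.add f' (g k) else f') s ↔
      n ∈ s ∨ ∃ k ∈ m, p k = true ∧ g k = n := by
  induction m generalizing s with
  | nil => simp
  | cons k m ih =>
    simp only [List.foldl_cons]
    by_cases h : p k
    · simp [h, ih, PySem.Set.mem_add]; tauto
    · simp [h, ih]

lemma mem_foldl_scan {α β : Type} (l : List α) (m : List β) (p : α → β → Bool) (g : β → Int)
    (s : PySem.Set Int) (n : Int) :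
    n ∈ l.foldl (fun f i => m.foldl (fun f' k => if p i k then PySem.Set.add f' (g k) else f') f) s ↔
      n ∈ s ∨ ∃ i ∈ l, ∃ k ∈ m, p i k = true ∧ g k = n := by
  induction l generalizing s with
  | nil => simp
  | cons i l ih =>
    simp only [List.foldl_cons]
    rw [ih, mem_foldl_inner]
    constructor
    · rintro (( hs | ⟨k, hk, hp, hg⟩) | ⟨i', hi', rest⟩)
      · exact Or.inl hs
      · exact Or.inr ⟨i, by simp, k, hk, hp, hg⟩
      · exact Or.inr ⟨i', by simp [hi'], rest⟩
    · rintro (hs | ⟨i', hi', rest⟩)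
      · exact Or.inl (Or.inl hs)
      · rcases List.mem_cons.1 hi' with h | h
        · subst h; exact Or.inl (Or.inr rest)
        · exact Or.inr ⟨i', h, rest⟩

lemma exists_start_iff_isIn (cs kw : List Char) (hkw : kw ≠ []) :
    (∃ i ∈ PySem.List.pyRange 0 (cs.length : Int) 1,
        PySem.Chars.startswith (cs.drop i.toNat) kw = true)
      ↔ PySem.Chars.isIn kw cs = true := by
  constructor
  · rintro ⟨i, _, hs⟩
    rw [← PySem.Chars.exists_prefix_drop_iff_isIn]
    exact ⟨i.toNat, (PySem.Chars.startswith_iff _ _).1 hs⟩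
  · intro h
    obtain ⟨j, hj⟩ := (PySem.Chars.exists_prefix_drop_iff_isIn kw cs).2 h
    by_cases hlt : j < cs.length
    · refine ⟨(j : Int), (PySem.List.mem_pyRange_one).2 ⟨by positivity, by exact_mod_cast hlt⟩, ?_⟩
      rw [PySem.Chars.startswith_iff]
      simpa using hj
    · exfalso
      have hnil : cs.drop j = [] := List.drop_eq_nil_of_le (by omega)
      rw [hnil] at hj
      exact hkw (List.prefix_nil.1 hj)

lemma mem_pvScan (cs : List Char) (n : Int) :
    n ∈ pvScan cs ↔ ∃ kt ∈ pvKeywords, PySem.Chars.isIn kt.1 cs = true ∧ kt.2 = n := by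
  unfold pvScan
  rw [mem_foldl_scan]
  simp only [PySem.Set.empty, List.not_mem_nil, false_or]
  constructor
  · rintro ⟨i, hi, kt, hkt, hp, hg⟩
    refine ⟨kt, hkt, ?_, hg⟩
    have hne : kt.1 ≠ [] := by
      fin_cases hkt <;> decide
    exact (exists_start_iff_isIn cs kt.1 hne).1 ⟨i, hi, hp⟩
  · rintro ⟨kt, hkt, hin, hg⟩
    have hne : kt.1 ≠ [] := by
      fin_cases hkt <;> decide
    obtain ⟨i, hi, hs⟩ := (exists_start_iff_isIn cs kt.1 hne).2 hin
    exact ⟨i, hi, kt, hkt, hs, hg⟩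

lemma mem_pvScan0 (cs : List Char) :
    (0 : Int) ∈ pvScan cs ↔ PySem.Chars.isIn "node".toList cs = true := by
  rw [mem_pvScan]; simp [pvKeywords]

lemma mem_pvScan1 (cs : List Char) :
    (1 : Int) ∈ pvScan cs ↔ (PySem.Chars.isIn "++>".toList cs = true ∨
      PySem.Chars.isIn "<++".toList cs = true ∨ PySem.Chars.isIn "<++>".toList cs = true) := by
  rw [mem_pvScan]; simp [pvKeywords]

lemma mem_pvScan2 (cs : List Char) :
    (2 : Int) ∈ pvScan cs ↔ PySem.Chars.isIn "walker".toList cs = true := by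
  rw [mem_pvScan]; simp [pvKeywords]

lemma mem_pvScan3 (cs : List Char) :
    (3 : Int) ∈ pvScan cs ↔ (PySem.Chars.isIn "ability".toList cs = true ∨
      PySem.Chars.isIn "can ".toList cs = true) := by
  rw [mem_pvScan]; simp [pvKeywords]

lemma mem_pvScan4 (cs : List Char) :
    (4 : Int) ∈ pvScan cs ↔ PySem.Chars.isIn "with entry".toList cs = true := by
  rw [mem_pvScan]; simp [pvKeywords]

-- ===== VERDICT (by name: the statement is the Claim_ definition above) =====
theorem generate_learning_tips_py_spec : Claim_equal_generate_learning_tips_py := by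
  intro code _
  unfold Spec_generate_learning_tips_py generate_learning_tips_py generate_learning_tips_py_alt
  simp only [PySem.List.enumerate, pvTips, List.filter]
  cases hn : PySem.Chars.isIn "node".toList code.toList <;>
  cases h1 : PySem.Chars.isIn "++>".toList code.toList <;>
  cases h2 : PySem.Chars.isIn "<++".toList code.toList <;>
  cases h3 : PySem.Chars.isIn "<++>".toList code.toList <;>
  cases hw : PySem.Chars.isIn "walker".toList code.toList <;>
  cases ha : PySem.Chars.isIn "ability".toList code.toList <;>
  cases hc : PySem.Chars.isIn "can ".toList code.toList <;>
  cases he : PySem.Chars.isIn "with entry".toList code.toList <;>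
  simp_all [mem_pvScan0, mem_pvScan1, mem_pvScan2, mem_pvScan3, mem_pvScan4]
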